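-- pv_equiv track=rewrite | github.com/YevhenNyzovyi/HillelSchool | 5 lesson/hw5.1.py | is_valid_variable_name
-- ===== SOURCE A (Python) =====
-- import keyword
-- import string
--
-- def is_valid_variable_name(name):
--
--     if not name or \
--        name in keyword.kwlist or \
--        name == '_' or \
--        name[0].isdigit() or \
--        not name == name.lower() or \
--        '__' in name:
--         return False
--
--     allowed_chars_string = string.ascii_lowercase + string.digits + '_'
--     for char in name:
--         if char not in allowed_chars_string:
--             return False
--
--     return True
-- ===== SOURCE B (Python) =====
-- import re
--
-- # keyword.kwlist (Python 3), hard-coded: the 'keyword' module may not be imported here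
-- _KWLIST = ["False", "None", "True", "and", "as", "assert", "async", "await", "break",
--            "class", "continue", "def", "del", "elif", "else", "except", "finally", "for",
--            "from", "global", "if", "import", "in", "is", "lambda", "nonlocal", "not",
--            "or", "pass", "raise", "return", "try", "while", "with", "yield"]
--
-- _IDENT = re.compile(r'(?!_$)(?!.*__)[a-z_][a-z0-9_]*')
--
-- def is_valid_variable_name(name):
--     if not name or name in _KWLIST:
--         return False
--     return _IDENT.fullmatch(name) is not None
-- ===== Notes on version B (the rewrite author's own statement) =====
-- stated objective: idiomatic
-- what changed: A's six-guard chain plus an explicit per-character membership loop over a 37-char allowed string is replaced by an empty/keyword guard and a single regex fullmatch r'(?!_$)(?!.*__)[a-z_][a-z0-9_]*', whose char classes subsume the digit-first, lowercase and allowed-character checks.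
import Mathlib
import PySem

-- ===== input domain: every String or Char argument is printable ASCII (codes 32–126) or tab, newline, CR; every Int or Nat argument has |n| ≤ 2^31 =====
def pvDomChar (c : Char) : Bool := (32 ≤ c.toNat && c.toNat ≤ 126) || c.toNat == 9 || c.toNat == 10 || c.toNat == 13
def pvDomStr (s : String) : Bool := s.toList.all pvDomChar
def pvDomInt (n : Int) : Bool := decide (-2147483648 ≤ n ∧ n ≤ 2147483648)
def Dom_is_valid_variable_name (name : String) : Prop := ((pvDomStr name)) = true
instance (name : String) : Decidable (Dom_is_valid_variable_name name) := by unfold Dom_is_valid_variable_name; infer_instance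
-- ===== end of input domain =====

-- B replaces A's guard chain plus per-character membership loop by a keyword check and one
-- regex fullmatch (ported by hand, exact for this fixed pattern); objective: idiomatic.

-- keyword.kwlist (Python 3), used by both versions
def pvKwlist : List String :=
  ["False", "None", "True", "and", "as", "assert", "async", "await", "break", "class",
   "continue", "def", "del", "elif", "else", "except", "finally", "for", "from", "global",
   "if", "import", "in", "is", "lambda", "nonlocal", "not", "or", "pass", "raise",
   "return", "try", "while", "with", "yield"]

-- ===== PORT A =====
-- string.ascii_lowercase + string.digits + '_'
def pvAllowed : List Char :=
  ['a','b','c','d','e','f','g','h','i','j','k','l','m','n','o','p','q','r','s','t',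
   'u','v','w','x','y','z','0','1','2','3','4','5','6','7','8','9','_']

-- A's for-loop: return False on the first char not in allowed_chars_string
def pvAllowedLoop : List Char → Bool
  | [] => true
  | c :: rest => if pvAllowed.contains c = false then false else pvAllowedLoop rest

def is_valid_variable_name (name : String) : Bool :=
  match name.toList with
  | [] => false                                  -- not name
  | c0 :: _ =>
    if pvKwlist.contains name                    -- name in keyword.kwlist
        || name == "_"                           -- name == '_'
        || PySem.Chars.isdigit c0                -- name[0].isdigit()
        || !(name == PySem.Str.lower name)       -- not name == name.lower()
        || PySem.Str.isIn "__" name              -- '__' in name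
    then false
    else pvAllowedLoop name.toList

-- ===== PORT B =====
-- regex char class [a-z_]
def pvFirstClass (c : Char) : Bool := decide ('a' ≤ c ∧ c ≤ 'z') || c == '_'
-- regex char class [a-z0-9_]
def pvRestClass (c : Char) : Bool :=
  decide ('a' ≤ c ∧ c ≤ 'z') || decide ('0' ≤ c ∧ c ≤ '9') || c == '_'

-- hand port of _IDENT.fullmatch(name) is not None, where
-- _IDENT = re.compile(r'(?!_$)(?!.*__)[a-z_][a-z0-9_]*'); exact for this fixed pattern:
-- the lookaheads are "the whole string is not '_'" and "'__' occurs nowhere", and the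
-- classes force the first char into [a-z_] and the rest into [a-z0-9_].
def pvRegexFullmatch : List Char → Bool
  | [] => false
  | c0 :: rest =>
    !(c0 == '_' && rest.isEmpty)
      && !(PySem.Chars.isIn ['_', '_'] (c0 :: rest))
      && pvFirstClass c0
      && rest.all pvRestClass

def is_valid_variable_name_alt (name : String) : Bool :=
  if name.toList.isEmpty || pvKwlist.contains name then false
  else pvRegexFullmatch name.toList

-- ===== PRECONDITION & SPEC =====
def Spec_is_valid_variable_name (name : String) (out : Bool) : Prop := out = is_valid_variable_name_alt name
instance (name : String) (out : Bool) : Decidable (Spec_is_valid_variable_name name out) := by unfold Spec_is_valid_variable_name; infer_instance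

-- ===== CLAIM (what is proved, stated in full; the proofs are below) =====
def Claim_equal_is_valid_variable_name : Prop := ∀ (name : String), Dom_is_valid_variable_name name → Spec_is_valid_variable_name name (is_valid_variable_name name)

-- ===== LEMMAS AND PROOFS =====

set_option maxRecDepth 16384 in
theorem pv_mem_allowed (c : Char) : pvAllowed.contains c = pvRestClass c := by
  rw [Bool.eq_iff_iff]
  simp only [pvAllowed, pvRestClass, List.contains_cons, List.contains_nil, Bool.or_eq_true,
    Bool.or_false, beq_iff_eq, decide_eq_true_eq, Char.le_def, Char.ext_iff,
    UInt32.le_iff_toNat_le, ← UInt32.toNat_inj]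
  simp only [show ('a').val.toNat = 97 from rfl, show ('b').val.toNat = 98 from rfl,
    show ('c').val.toNat = 99 from rfl, show ('d').val.toNat = 100 from rfl,
    show ('e').val.toNat = 101 from rfl, show ('f').val.toNat = 102 from rfl,
    show ('g').val.toNat = 103 from rfl, show ('h').val.toNat = 104 from rfl,
    show ('i').val.toNat = 105 from rfl, show ('j').val.toNat = 106 from rfl,
    show ('k').val.toNat = 107 from rfl, show ('l').val.toNat = 108 from rfl,
    show ('m').val.toNat = 109 from rfl, show ('n').val.toNat = 110 from rfl,
    show ('o').val.toNat = 111 from rfl, show ('p').val.toNat = 112 from rfl,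
    show ('q').val.toNat = 113 from rfl, show ('r').val.toNat = 114 from rfl,
    show ('s').val.toNat = 115 from rfl, show ('t').val.toNat = 116 from rfl,
    show ('u').val.toNat = 117 from rfl, show ('v').val.toNat = 118 from rfl,
    show ('w').val.toNat = 119 from rfl, show ('x').val.toNat = 120 from rfl,
    show ('y').val.toNat = 121 from rfl, show ('z').val.toNat = 122 from rfl,
    show ('0').val.toNat = 48 from rfl, show ('1').val.toNat = 49 from rfl,
    show ('2').val.toNat = 50 from rfl, show ('3').val.toNat = 51 from rfl,
    show ('4').val.toNat = 52 from rfl, show ('5').val.toNat = 53 from rfl,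
    show ('6').val.toNat = 54 from rfl, show ('7').val.toNat = 55 from rfl,
    show ('8').val.toNat = 56 from rfl, show ('9').val.toNat = 57 from rfl,
    show ('_').val.toNat = 95 from rfl]
  omega

theorem pv_loop_eq_all (cs : List Char) : pvAllowedLoop cs = cs.all pvRestClass := by
  induction cs with
  | nil => rfl
  | cons c rest ih =>
    simp only [pvAllowedLoop, List.all_cons, pv_mem_allowed, ih]
    cases pvRestClass c <;> simp

theorem pv_lowerChar_fix (c : Char) (h : pvRestClass c = true) : PySem.Chars.lowerChar c = c := by
  simp only [pvRestClass, Bool.or_eq_true, decide_eq_true_eq, beq_iff_eq, Char.le_def,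
    Char.ext_iff, UInt32.le_iff_toNat_le, ← UInt32.toNat_inj] at h
  rw [PySem.Chars.lowerChar, if_neg]
  simp only [PySem.Chars.isupper, Bool.and_eq_true, decide_eq_true_eq, Char.le_def,
    UInt32.le_iff_toNat_le]
  rintro ⟨h1, h2⟩
  simp only [show ('A').val.toNat = 65 from rfl, show ('Z').val.toNat = 90 from rfl] at h1 h2
  simp only [show ('a').val.toNat = 97 from rfl, show ('z').val.toNat = 122 from rfl,
    show ('0').val.toNat = 48 from rfl, show ('9').val.toNat = 57 from rfl,
    show ('_').val.toNat = 95 from rfl] at h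
  omega

theorem pv_lower_fix (cs : List Char) (h : cs.all pvRestClass = true) :
    PySem.Chars.lower cs = cs := by
  simp only [List.all_eq_true] at h
  simp only [PySem.Chars.lower]
  rw [List.map_congr_left fun c hc => pv_lowerChar_fix c (h c hc)]
  simp

theorem pv_first_class (c : Char) : pvFirstClass c = (pvRestClass c && !PySem.Chars.isdigit c) := by
  simp only [pvFirstClass, pvRestClass, PySem.Chars.isdigit]
  rw [Bool.eq_iff_iff]
  simp only [Bool.and_eq_true, Bool.not_eq_true', Bool.and_eq_false_iff, Bool.or_eq_true,
    decide_eq_true_eq, decide_eq_false_iff_not, beq_iff_eq, Char.le_def, Char.ext_iff,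
    UInt32.le_iff_toNat_le, ← UInt32.toNat_inj]
  simp only [show ('a').val.toNat = 97 from rfl, show ('z').val.toNat = 122 from rfl,
    show ('0').val.toNat = 48 from rfl, show ('9').val.toNat = 57 from rfl,
    show ('_').val.toNat = 95 from rfl]
  omega

-- the list-level core: A's guard-and-loop equals B's regex match, on a nonempty char list
-- that is not a keyword (both sides already handled '' and keywords)
theorem pv_core (c0 : Char) (rest : List Char) :
    ((!decide (c0 = '_') || !decide (rest = [])) && !PySem.Chars.isdigit c0 &&
          decide (c0 :: rest = PySem.Chars.lower (c0 :: rest)) &&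
        !PySem.Chars.isIn ['_', '_'] (c0 :: rest) &&
      pvAllowedLoop (c0 :: rest)) = pvRegexFullmatch (c0 :: rest) := by
  rw [pv_loop_eq_all]
  by_cases hall : (c0 :: rest).all pvRestClass = true
  · have hc0 : pvRestClass c0 = true := by
      simp only [List.all_cons, Bool.and_eq_true] at hall; exact hall.1
    have hrest : rest.all pvRestClass = true := by
      simp only [List.all_cons, Bool.and_eq_true] at hall; exact hall.2
    have hlow : decide (c0 :: rest = PySem.Chars.lower (c0 :: rest)) = true := by
      simp [pv_lower_fix _ hall]
    simp only [pvRegexFullmatch, hall, hlow, hrest, pv_first_class, hc0, Bool.true_and,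
      Bool.and_true]
    cases hd : PySem.Chars.isdigit c0 <;>
      cases hin : PySem.Chars.isIn ['_', '_'] (c0 :: rest) <;>
        cases hr : rest <;> simp <;> tauto
  · have hf : pvRegexFullmatch (c0 :: rest) = false := by
      simp only [List.all_cons, Bool.and_eq_true, not_and_or, Bool.not_eq_true] at hall
      rcases hall with hc0 | hrest
      · simp [pvRegexFullmatch, pv_first_class, hc0]
      · simp [pvRegexFullmatch, hrest]
    rw [hf]
    simp [Bool.eq_false_iff.mpr hall]

-- ===== VERDICT (by name: the statement is the Claim_ definition above) =====
theorem is_valid_variable_name_spec : Claim_equal_is_valid_variable_name := by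
  intro name _
  unfold Spec_is_valid_variable_name
  cases h : name.toList with
  | nil =>
    simp [is_valid_variable_name, is_valid_variable_name_alt, h]
  | cons c0 rest =>
    by_cases hk : name ∈ pvKwlist
    · simp [is_valid_variable_name, is_valid_variable_name_alt, h, hk]
    · have hund : decide (name = "_") = decide ((c0 :: rest) = ['_']) :=
        decide_eq_decide.mpr (by rw [String.ext_iff, h]; simp)
      have hlow : decide (name = PySem.Str.lower name)
          = decide ((c0 :: rest) = PySem.Chars.lower (c0 :: rest)) :=
        decide_eq_decide.mpr (by rw [String.ext_iff, PySem.Str.toList_lower, h])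
      simp only [is_valid_variable_name, is_valid_variable_name_alt, h]
      simp [hk, hund, hlow, h]
      exact pv_core c0 rest
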